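-- pv_equiv track=rewrite | github.com/mrunknown850/ClassSorts | tools.py | sortingAlgo
-- ===== SOURCE A (Python) =====
-- def sortingAlgo(weekCount: int, rowShiftCycle: int, groupShiftCycle: int,
--                 groupShiftDuration: int, rowShiftDuration: int,
--                 filteredList: list, isInitial: bool, rowOffset: bool,
--                 groupOffset: bool) -> list:
--
--     outputList = filteredList.copy()
--
--     if isInitial:
--         if weekCount == 0:
--             return outputList
--         for weekCycle in range(weekCount):
--             if weekCycle == 1:
--                 continue
--             # Perform rowShift
--             if weekCount % rowShiftDuration == 0 and not rowOffset:
--                 tempList = (outputList[-rowShiftCycle:]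
--                             + outputList[:-rowShiftCycle])
--                 outputList = tempList.copy()
--             elif weekCount % rowShiftDuration == 1 and rowOffset:
--                 tempList = (outputList[-rowShiftCycle:]
--                             + outputList[:-rowShiftCycle])
--                 outputList = tempList.copy()
--
--             # Perform groupShift
--             if weekCount % groupShiftDuration == 0 and not groupOffset:
--                 tempList = []
--                 for row in outputList:
--                     tempList.append(row[groupShiftCycle:]
--                                     + row[:groupShiftCycle])
--                 outputList = tempList.copy()
--             elif weekCount % groupShiftDuration == 1 and groupOffset:
--                 tempList = []
--                 for row in outputList:
--                     tempList.append(row[groupShiftCycle:]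
--                                     + row[:groupShiftCycle])
--                 outputList = tempList.copy()
--         # return outputList
--     else:
--         if weekCount % rowShiftDuration == 0:
--             tempList = (outputList[-rowShiftCycle:]
--                         + outputList[:-rowShiftCycle])
--             outputList = tempList.copy()
--
--             # Perform groupShift
--         if weekCount % groupShiftDuration == 0:
--             tempList = []
--             for row in outputList:
--                 tempList.append(row[groupShiftCycle:]
--                                 + row[:groupShiftCycle])
--             outputList = tempList.copy()
--     return outputList
-- ===== SOURCE B (Python) =====
-- def sortingAlgo(weekCount: int, rowShiftCycle: int, groupShiftCycle: int,
--                 groupShiftDuration: int, rowShiftDuration: int,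
--                 filteredList: list, isInitial: bool, rowOffset: bool,
--                 groupOffset: bool) -> list:
--     # Collapse the week-by-week shifts into a single rotation of the row list
--     # and a single rotation of each row, computed from the repetition count.
--
--     def rotated(lst, k):
--         # lst rotated left by k positions (any k >= 0)
--         if not lst:
--             return []
--         k %= len(lst)
--         return lst[k:] + lst[:k]
--
--     out = list(filteredList)
--     if isInitial:
--         if weekCount <= 0:
--             return out
--         # week 1 keeps week 0's layout, so the shifts fire once per remaining week
--         reps = weekCount - (1 if weekCount > 1 else 0)
--         m = weekCount % rowShiftDuration
--         doRow = (m == 0 and not rowOffset) or (m == 1 and rowOffset)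
--         m = weekCount % groupShiftDuration
--         doGroup = (m == 0 and not groupOffset) or (m == 1 and groupOffset)
--     else:
--         reps = 1
--         doRow = weekCount % rowShiftDuration == 0
--         doGroup = weekCount % groupShiftDuration == 0
--
--     if doRow:
--         # one shift sends the last rowShiftCycle rows to the front, i.e. a left
--         # rotation by the length of the part that moves to the back
--         out = rotated(out, reps * len(out[:-rowShiftCycle]))
--     if doGroup:
--         out = [rotated(row, reps * len(row[:groupShiftCycle])) for row in out]
--     return out
-- ===== Notes on version B (the rewrite author's own statement) =====
-- stated objective: alternative
-- what changed: A applies the row rotation and the per-row group rotation once per week in a loop over weekCount; B counts how often each shift fires and applies a single rotation by the composed offset reduced mod the list length. Pre_ excludes only the inputs where Python's '%' raises ZeroDivisionError (a zero shift duration when the modulo is evaluated).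
import Mathlib
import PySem

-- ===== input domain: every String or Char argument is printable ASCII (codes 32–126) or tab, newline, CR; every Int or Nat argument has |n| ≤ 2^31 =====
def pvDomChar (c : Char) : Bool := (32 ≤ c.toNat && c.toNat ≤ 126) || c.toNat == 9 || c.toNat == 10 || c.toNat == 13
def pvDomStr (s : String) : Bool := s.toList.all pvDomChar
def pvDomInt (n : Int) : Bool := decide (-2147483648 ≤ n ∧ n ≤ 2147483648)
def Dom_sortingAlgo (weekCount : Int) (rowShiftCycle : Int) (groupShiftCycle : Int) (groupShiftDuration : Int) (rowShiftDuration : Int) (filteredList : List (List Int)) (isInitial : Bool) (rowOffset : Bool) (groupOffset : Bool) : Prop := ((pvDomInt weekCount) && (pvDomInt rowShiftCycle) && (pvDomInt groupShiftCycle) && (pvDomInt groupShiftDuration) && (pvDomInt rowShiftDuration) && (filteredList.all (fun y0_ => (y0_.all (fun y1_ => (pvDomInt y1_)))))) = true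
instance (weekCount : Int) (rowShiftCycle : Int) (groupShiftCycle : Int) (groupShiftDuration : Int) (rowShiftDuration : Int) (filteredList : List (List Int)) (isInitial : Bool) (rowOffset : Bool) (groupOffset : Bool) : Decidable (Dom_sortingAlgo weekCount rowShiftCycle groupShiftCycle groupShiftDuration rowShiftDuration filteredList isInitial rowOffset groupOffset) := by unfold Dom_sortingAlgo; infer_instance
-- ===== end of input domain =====

-- B collapses A's week-by-week loop of list rotations into a single rotation by
-- the composed offset (reps * per-application offset, reduced mod the length).

-- ===== PORT A =====
-- outputList[-c:] + outputList[:-c]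
def pvRowShiftA (c : Int) (l : List (List Int)) : List (List Int) :=
  PySem.List.slice l (some (-c)) none ++ PySem.List.slice l none (some (-c))

-- row[g:] + row[:g]
def pvGroupRowA (g : Int) (row : List Int) : List Int :=
  PySem.List.slice row (some g) none ++ PySem.List.slice row none (some g)

-- tempList = []; for row in outputList: tempList.append(row[g:] + row[:g])
def pvGroupShiftA (g : Int) (l : List (List Int)) : List (List Int) :=
  l.foldl (fun tempList row => tempList ++ [pvGroupRowA g row]) []

-- one iteration of A's week loop (after the 'continue' test)
def pvBodyA (weekCount rowShiftCycle groupShiftCycle groupShiftDuration rowShiftDuration : Int)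
    (rowOffset groupOffset : Bool) (outputList : List (List Int)) : List (List Int) :=
  let outputList :=
    if PySem.Int.mod weekCount rowShiftDuration = 0 ∧ rowOffset = false then
      pvRowShiftA rowShiftCycle outputList
    else if PySem.Int.mod weekCount rowShiftDuration = 1 ∧ rowOffset = true then
      pvRowShiftA rowShiftCycle outputList
    else outputList
  if PySem.Int.mod weekCount groupShiftDuration = 0 ∧ groupOffset = false then
    pvGroupShiftA groupShiftCycle outputList
  else if PySem.Int.mod weekCount groupShiftDuration = 1 ∧ groupOffset = true then
    pvGroupShiftA groupShiftCycle outputList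
  else outputList

def sortingAlgo (weekCount : Int) (rowShiftCycle : Int) (groupShiftCycle : Int) (groupShiftDuration : Int) (rowShiftDuration : Int) (filteredList : List (List Int)) (isInitial : Bool) (rowOffset : Bool) (groupOffset : Bool) : List (List Int) :=
  if isInitial = true then
    if weekCount = 0 then filteredList
    else
      (PySem.List.pyRange 0 weekCount 1).foldl
        (fun outputList weekCycle =>
          if weekCycle = 1 then outputList
          else pvBodyA weekCount rowShiftCycle groupShiftCycle groupShiftDuration rowShiftDuration rowOffset groupOffset outputList)
        filteredList
  else
    let outputList :=
      if PySem.Int.mod weekCount rowShiftDuration = 0 then pvRowShiftA rowShiftCycle filteredList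
      else filteredList
    if PySem.Int.mod weekCount groupShiftDuration = 0 then pvGroupShiftA groupShiftCycle outputList
    else outputList

-- ===== PORT B =====
-- B's rotated(lst, k): lst rotated left by k, k reduced mod len first
def pvRot {α : Type} (l : List α) (k : Nat) : List α :=
  if l.length = 0 then []
  else
    let k := k % l.length
    PySem.List.slice l (some (k : Int)) none ++ PySem.List.slice l none (some (k : Int))

-- len(out[:-rowShiftCycle]) : the left-rotation offset of one row shift
def pvRowOff (c : Int) (l : List (List Int)) : Nat :=
  (PySem.List.slice l none (some (-c))).length

-- len(row[:groupShiftCycle]) : the left-rotation offset of one group shift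
def pvGrpOff (g : Int) (row : List Int) : Nat :=
  (PySem.List.slice row none (some g)).length

-- B's common tail: apply the collapsed rotations once
def pvApply (reps : Nat) (doRow doGroup : Bool) (c g : Int) (out : List (List Int)) : List (List Int) :=
  let out := if doRow then pvRot out (reps * pvRowOff c out) else out
  if doGroup then out.map (fun row => pvRot row (reps * pvGrpOff g row)) else out

def sortingAlgo_alt (weekCount : Int) (rowShiftCycle : Int) (groupShiftCycle : Int) (groupShiftDuration : Int) (rowShiftDuration : Int) (filteredList : List (List Int)) (isInitial : Bool) (rowOffset : Bool) (groupOffset : Bool) : List (List Int) :=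
  if isInitial = true then
    if weekCount ≤ 0 then filteredList
    else
      let reps := (weekCount - if 1 < weekCount then 1 else 0).toNat
      let r := PySem.Int.mod weekCount rowShiftDuration
      let doRow := (r == 0 && !rowOffset) || (r == 1 && rowOffset)
      let g := PySem.Int.mod weekCount groupShiftDuration
      let doGroup := (g == 0 && !groupOffset) || (g == 1 && groupOffset)
      pvApply reps doRow doGroup rowShiftCycle groupShiftCycle filteredList
  else
    pvApply 1 (PySem.Int.mod weekCount rowShiftDuration == 0)
      (PySem.Int.mod weekCount groupShiftDuration == 0) rowShiftCycle groupShiftCycle filteredList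

-- ===== PRECONDITION & SPEC =====
-- Pre_ excludes exactly the inputs where Python's '%' raises ZeroDivisionError:
-- a zero duration, whenever the corresponding modulo is actually evaluated.
def Pre_sortingAlgo (weekCount : Int) (rowShiftCycle : Int) (groupShiftCycle : Int) (groupShiftDuration : Int) (rowShiftDuration : Int) (filteredList : List (List Int)) (isInitial : Bool) (rowOffset : Bool) (groupOffset : Bool) : Prop :=
  (isInitial = true → 1 ≤ weekCount → rowShiftDuration ≠ 0 ∧ groupShiftDuration ≠ 0) ∧
  (isInitial = false → rowShiftDuration ≠ 0 ∧ groupShiftDuration ≠ 0)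
instance (weekCount : Int) (rowShiftCycle : Int) (groupShiftCycle : Int) (groupShiftDuration : Int) (rowShiftDuration : Int) (filteredList : List (List Int)) (isInitial : Bool) (rowOffset : Bool) (groupOffset : Bool) : Decidable (Pre_sortingAlgo weekCount rowShiftCycle groupShiftCycle groupShiftDuration rowShiftDuration filteredList isInitial rowOffset groupOffset) := by unfold Pre_sortingAlgo; infer_instance

def pvWitness_sortingAlgo : Int × Int × Int × Int × Int × List (List Int) × Bool × Bool × Bool :=
  (3, 1, 1, 1, 1, [[1, 2], [3, 4]], true, false, false)

def Spec_sortingAlgo (weekCount : Int) (rowShiftCycle : Int) (groupShiftCycle : Int) (groupShiftDuration : Int) (rowShiftDuration : Int) (filteredList : List (List Int)) (isInitial : Bool) (rowOffset : Bool) (groupOffset : Bool) (out : List (List Int)) : Prop := out = sortingAlgo_alt weekCount rowShiftCycle groupShiftCycle groupShiftDuration rowShiftDuration filteredList isInitial rowOffset groupOffset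
instance (weekCount : Int) (rowShiftCycle : Int) (groupShiftCycle : Int) (groupShiftDuration : Int) (rowShiftDuration : Int) (filteredList : List (List Int)) (isInitial : Bool) (rowOffset : Bool) (groupOffset : Bool) (out : List (List Int)) : Decidable (Spec_sortingAlgo weekCount rowShiftCycle groupShiftCycle groupShiftDuration rowShiftDuration filteredList isInitial rowOffset groupOffset out) := by unfold Spec_sortingAlgo; infer_instance

-- ===== CLAIM (what is proved, stated in full; the proofs are below) =====
def Claim_equal_sortingAlgo : Prop := ∀ (weekCount : Int) (rowShiftCycle : Int) (groupShiftCycle : Int) (groupShiftDuration : Int) (rowShiftDuration : Int) (filteredList : List (List Int)) (isInitial : Bool) (rowOffset : Bool) (groupOffset : Bool), Dom_sortingAlgo weekCount rowShiftCycle groupShiftCycle groupShiftDuration rowShiftDuration filteredList isInitial rowOffset groupOffset → Pre_sortingAlgo weekCount rowShiftCycle groupShiftCycle groupShiftDuration rowShiftDuration filteredList isInitial rowOffset groupOffset → Spec_sortingAlgo weekCount rowShiftCycle groupShiftCycle groupShiftDuration rowShiftDuration filteredList isInitial rowOffset groupOffset (sortingAlgo weekCount rowShiftCycle groupShiftCycle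 groupShiftDuration rowShiftDuration filteredList isInitial rowOffset groupOffset)

-- ===== LEMMAS AND PROOFS =====

-- the length of l[:b] is the clamped index
theorem len_slice_to {α : Type} (l : List α) (b : Int) :
    (PySem.List.slice l none (some b)).length = PySem.List.clampIdx l.length b := by
  by_cases h : 0 ≤ b
  · have hb : b = ((b.toNat : Nat) : Int) := by omega
    rw [hb, PySem.List.slice_to_natCast, PySem.List.clampIdx_natCast, List.length_take]
  · have h0 : 0 < (-b).toNat := by omega
    have hb : b = -(((-b).toNat : Nat) : Int) := by omega
    rw [hb, PySem.List.slice_to_neg_natCast l (-b).toNat h0,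
      PySem.List.clampIdx_neg_natCast _ _ h0, List.length_take]
    omega

theorem pvRowOff_eq (c : Int) (l : List (List Int)) :
    pvRowOff c l = PySem.List.clampIdx l.length (-c) := len_slice_to l (-c)

theorem pvGrpOff_eq (g : Int) (row : List Int) :
    pvGrpOff g row = PySem.List.clampIdx row.length g := len_slice_to row g

-- l[x:] + l[:x] is a rotation by the clamped index
theorem slicepair_rot {α : Type} (l : List α) (x : Int) :
    PySem.List.slice l (some x) none ++ PySem.List.slice l none (some x) =
      l.rotate (PySem.List.clampIdx l.length x) := by
  by_cases h : 0 ≤ x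
  · have hx : x = ((x.toNat : Nat) : Int) := by omega
    rw [hx, PySem.List.slice_from_natCast, PySem.List.slice_to_natCast,
      PySem.List.clampIdx_natCast]
    rcases le_total x.toNat l.length with hle | hle
    · rw [min_eq_left hle, List.rotate_eq_drop_append_take hle]
    · rw [min_eq_right hle, List.drop_eq_nil_of_le hle, List.take_of_length_le hle,
        List.rotate_length, List.nil_append]
  · have h0 : 0 < (-x).toNat := by omega
    have hx : x = -(((-x).toNat : Nat) : Int) := by omega
    rw [hx, PySem.List.slice_from_neg_natCast l (-x).toNat h0,
      PySem.List.slice_to_neg_natCast l (-x).toNat h0,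
      PySem.List.clampIdx_neg_natCast _ _ h0,
      ← List.rotate_eq_drop_append_take (by omega)]

-- B's rotated is List.rotate
theorem pvRot_eq_rotate {α : Type} (l : List α) (k : Nat) : pvRot l k = l.rotate k := by
  unfold pvRot
  by_cases h : l.length = 0
  · have : l = [] := List.length_eq_zero_iff.mp h
    simp [this]
  · simp only [h, if_false]
    rw [slicepair_rot, PySem.List.clampIdx_natCast,
      min_eq_left (le_of_lt (Nat.mod_lt _ (Nat.pos_of_ne_zero h))), List.rotate_mod]

-- one application of A's row shift is a rotation by pvRowOff
theorem pvRowShiftA_eq_rotate (c : Int) (l : List (List Int)) :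
    pvRowShiftA c l = l.rotate (pvRowOff c l) := by
  rw [pvRowShiftA, pvRowOff_eq, slicepair_rot]

-- one application of A's per-row group shift is a rotation by pvGrpOff
theorem pvGroupRowA_eq_rotate (g : Int) (row : List Int) :
    pvGroupRowA g row = row.rotate (pvGrpOff g row) := by
  rw [pvGroupRowA, pvGrpOff_eq, slicepair_rot]

theorem pvGroupShiftA_eq_map (g : Int) (l : List (List Int)) :
    pvGroupShiftA g l = l.map (pvGroupRowA g) := by
  unfold pvGroupShiftA
  simpa using PySem.List.foldl_append_singleton_eq_map (pvGroupRowA g) l []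

-- normalized form of one loop iteration
theorem pvBodyA_eq (w rc gc gd rd : Int) (ro go : Bool) (l : List (List Int)) :
    pvBodyA w rc gc gd rd ro go l =
      pvApply 1 ((PySem.Int.mod w rd == 0 && !ro) || (PySem.Int.mod w rd == 1 && ro))
        ((PySem.Int.mod w gd == 0 && !go) || (PySem.Int.mod w gd == 1 && go)) rc gc l := by
  cases ro <;> cases go <;>
    by_cases h1 : PySem.Int.mod w rd = 0 <;> by_cases h2 : PySem.Int.mod w rd = 1 <;>
    by_cases h3 : PySem.Int.mod w gd = 0 <;> by_cases h4 : PySem.Int.mod w gd = 1 <;>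
    simp [pvBodyA, pvApply, h1, h2, h3, h4, pvRot_eq_rotate, pvRowShiftA_eq_rotate,
      pvGroupShiftA_eq_map, pvGroupRowA_eq_rotate, pvRowOff_eq, pvGrpOff_eq]

-- composing one more application
theorem pvApply_succ (bR bG : Bool) (c g : Int) (N : Nat) (l : List (List Int)) :
    pvApply 1 bR bG c g (pvApply N bR bG c g l) = pvApply (N + 1) bR bG c g l := by
  cases bR <;> cases bG <;>
    simp [pvApply, pvRot_eq_rotate, pvRowOff_eq, pvGrpOff_eq, List.map_rotate,
      List.map_map, List.rotate_rotate, Nat.succ_mul, Function.comp]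

theorem pvApply_one_iterate (bR bG : Bool) (c g : Int) (N : Nat) (l : List (List Int)) :
    (pvApply 1 bR bG c g)^[N] l = pvApply N bR bG c g l := by
  induction N with
  | zero =>
    cases bR <;> cases bG <;> simp [pvApply, pvRot_eq_rotate]
  | succ N ih =>
    rw [Function.iterate_succ_apply', ih, pvApply_succ]

-- folding a body that skips index 1 over a 1-free list is iteration
theorem foldl_skip_one (f : List (List Int) → List (List Int)) (L : List Int)
    (init : List (List Int)) (h : ∀ x ∈ L, x ≠ 1) :
    L.foldl (fun acc i => if i = 1 then acc else f acc) init = f^[L.length] init := by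
  induction L generalizing init with
  | nil => rfl
  | cons x L ih =>
    have hx : x ≠ 1 := h x (List.mem_cons_self)
    simp only [List.foldl_cons, if_neg hx, List.length_cons]
    rw [ih _ (fun y hy => h y (List.mem_cons_of_mem _ hy)),
      ← Function.iterate_succ_apply]

-- A's week loop is f^[reps]
theorem foldl_pyRange_skip (f : List (List Int) → List (List Int)) (w : Int) (hw : 1 ≤ w)
    (init : List (List Int)) :
    (PySem.List.pyRange 0 w 1).foldl
        (fun acc i => if i = 1 then acc else f acc) init =
      f^[(w - if 1 < w then 1 else 0).toNat] init := by
  rcases lt_or_ge w 2 with h2 | h2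
  · have hw1 : w = 1 := by omega
    subst hw1
    rw [PySem.List.pyRange_one_cons (by omega), PySem.List.pyRange_one_eq_nil (by omega)]
    simp
  · rw [PySem.List.pyRange_one_cons (by omega), PySem.List.pyRange_one_cons (by omega)]
    simp only [List.foldl_cons]
    rw [if_neg (by norm_num : ¬ (0:Int) = 1), if_pos (by norm_num : (0:Int) + 1 = 1)]
    rw [foldl_skip_one f _ _ (fun x hx => by
      have := (PySem.List.mem_pyRange_one).mp hx
      omega)]
    rw [PySem.List.length_pyRange_one, ← Function.iterate_succ_apply, if_pos (by omega : 1 < w)]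
    congr 1
    omega

-- ===== VERDICT (by name: the statement is the Claim_ definition above) =====
theorem sortingAlgo_spec : Claim_equal_sortingAlgo := by
  intro w rc gc gd rd fl ii ro go _ _
  unfold Spec_sortingAlgo sortingAlgo sortingAlgo_alt
  cases ii with
  | false =>
    by_cases h1 : PySem.Int.mod w rd = 0 <;> by_cases h2 : PySem.Int.mod w gd = 0 <;>
      simp [pvApply, h1, h2, pvRot_eq_rotate, pvRowShiftA_eq_rotate,
        pvGroupShiftA_eq_map, pvGroupRowA_eq_rotate, pvRowOff_eq, pvGrpOff_eq]
  | true =>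
    by_cases hw : w ≤ 0
    · by_cases hw0 : w = 0
      · simp [hw0]
      · have hnil : PySem.List.pyRange 0 w 1 = [] := PySem.List.pyRange_one_eq_nil (by omega)
        simp [hw, hw0, hnil]
    · have hw1 : 1 ≤ w := by omega
      have hb : pvBodyA w rc gc gd rd ro go =
          pvApply 1 ((PySem.Int.mod w rd == 0 && !ro) || (PySem.Int.mod w rd == 1 && ro))
            ((PySem.Int.mod w gd == 0 && !go) || (PySem.Int.mod w gd == 1 && go)) rc gc :=
        funext (pvBodyA_eq w rc gc gd rd ro go)
      simp only [if_neg (by omega : ¬ w = 0), if_neg hw]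
      rw [foldl_pyRange_skip (pvBodyA w rc gc gd rd ro go) w hw1 fl, hb,
        pvApply_one_iterate]
      simp
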